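-- pv_equiv track=rewrite | github.com/pypi-data/pypi-mirror-403 | packages/openapi-ts-client/openapi_ts_client-1.4.0-py3-none-any.whl/openapi_ts_client/utils/naming.py | tag_to_service_filename
-- ===== SOURCE A (Python) =====
-- def tag_to_service_filename(tag: str) -> str:
--     """
--     Convert OpenAPI tag to Angular service filename.
--
--     Examples:
--         Feedings -> feedings.service.ts
--         HTTPMetrics -> hTTPMetrics.service.ts
--         Care Plans -> carePlans.service.ts
--         Audit fields -> auditFields.service.ts
--     """
--     # Remove spaces and join words
--     words = tag.split()
--     if not words:
--         return ".service.ts"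
--
--     # First word: lowercase first char
--     # Subsequent words: capitalize first char (camelCase join)
--     result = words[0][0].lower() + words[0][1:] if words[0] else ""
--     for word in words[1:]:
--         if word:
--             result += word[0].upper() + word[1:]
--
--     return f"{result}.service.ts"
-- ===== SOURCE B (Python) =====
-- def tag_to_service_filename(tag: str) -> str:
--     """Convert OpenAPI tag to Angular service filename.
--
--     Single character-level scan (finite state machine): no split()/join().
--     'boundary' is True when the next non-space character starts a new word;
--     that character is lowered if it is the very first letter emitted,
--     uppered otherwise; all other characters are copied verbatim.
--     """
--     out = []
--     boundary = True
--     for ch in tag: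
--         if ch.isspace():
--             boundary = True
--         elif boundary:
--             out.append(ch.lower() if not out else ch.upper())
--             boundary = False
--         else:
--             out.append(ch)
--     return ''.join(out) + ".service.ts"
-- ===== Notes on version B (the rewrite author's own statement) =====
-- stated objective: alternative
-- what changed: B replaces A's split()-into-words-then-join construction with a single character-level finite-state scan over the raw string (boundary flag; first emitted letter lowered, later word-initial letters uppered, others copied), never materialising a word list.
import Mathlib
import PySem

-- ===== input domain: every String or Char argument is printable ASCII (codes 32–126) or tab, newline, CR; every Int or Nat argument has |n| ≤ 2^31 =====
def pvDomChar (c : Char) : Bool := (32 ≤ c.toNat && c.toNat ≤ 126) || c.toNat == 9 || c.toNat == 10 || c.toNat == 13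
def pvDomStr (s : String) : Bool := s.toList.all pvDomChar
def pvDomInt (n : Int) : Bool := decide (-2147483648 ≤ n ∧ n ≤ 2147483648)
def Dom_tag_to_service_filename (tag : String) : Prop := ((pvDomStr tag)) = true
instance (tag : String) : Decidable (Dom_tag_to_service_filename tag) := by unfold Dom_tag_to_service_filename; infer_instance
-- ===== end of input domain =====

-- B replaces A's split-words-then-join construction with a single character-level
-- finite-state scan over the raw string (objective: alternative; same cost).


-- ===== PORT A =====
def tag_to_service_filename (tag : String) : String :=
  let words := PySem.Chars.split₀ tag.toList
  match words with
  | [] => ".service.ts"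
  | w0 :: rest =>
    -- result = words[0][0].lower() + words[0][1:] if words[0] else ""
    let result := match w0 with
      | [] => []
      | c :: cs => PySem.Chars.lowerChar c :: cs
    -- for word in words[1:]: if word: result += word[0].upper() + word[1:]
    let result := rest.foldl (fun r w =>
      if w.isEmpty then r
      else r ++ (match w with
        | [] => []
        | c :: cs => PySem.Chars.upperChar c :: cs)) result
    String.ofList (result ++ ".service.ts".toList)

-- ===== PORT B =====
-- single state-machine pass: (out, boundary); a space sets boundary, a
-- word-initial char is lowered if nothing was emitted yet, uppered otherwise
def tag_to_service_filename_alt (tag : String) : String :=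
  let st := tag.toList.foldl (fun (st : List Char × Bool) ch =>
      if PySem.Chars.isspace ch then (st.1, true)
      else if st.2 then
        (st.1 ++ [if st.1.isEmpty then PySem.Chars.lowerChar ch else PySem.Chars.upperChar ch], false)
      else (st.1 ++ [ch], false)) ([], true)
  String.ofList (st.1 ++ ".service.ts".toList)

-- ===== PRECONDITION & SPEC =====
def Spec_tag_to_service_filename (tag : String) (out : String) : Prop := out = tag_to_service_filename_alt tag
instance (tag : String) (out : String) : Decidable (Spec_tag_to_service_filename tag out) := by unfold Spec_tag_to_service_filename; infer_instance

-- ===== CLAIM (what is proved, stated in full; the proofs are below) =====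
def Claim_equal_tag_to_service_filename : Prop := ∀ (tag : String), Dom_tag_to_service_filename tag → Spec_tag_to_service_filename tag (tag_to_service_filename tag)

-- ===== LEMMAS AND PROOFS =====

-- B's step function (definitionally the lambda inside tag_to_service_filename_alt)
def pvStep (st : List Char × Bool) (ch : Char) : List Char × Bool :=
  if PySem.Chars.isspace ch then (st.1, true)
  else if st.2 then
    (st.1 ++ [if st.1.isEmpty then PySem.Chars.lowerChar ch else PySem.Chars.upperChar ch], false)
  else (st.1 ++ [ch], false)

def pvP (d : Char) : Bool := !(PySem.Chars.isspace d)

def pvCap (w : List Char) : List Char :=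
  match w with
  | [] => []
  | c :: cs => PySem.Chars.upperChar c :: cs

def pvCapAll (ws : List (List Char)) : List Char := (ws.map pvCap).flatten

def pvCamel (ws : List (List Char)) : List Char :=
  match ws with
  | [] => []
  | w :: rest =>
    (match w with
     | [] => []
     | c :: cs => PySem.Chars.lowerChar c :: cs) ++ pvCapAll rest

theorem pv_alt_eq (tag : String) :
    tag_to_service_filename_alt tag
      = String.ofList ((tag.toList.foldl pvStep ([], true)).1 ++ ".service.ts".toList) := rfl

-- every word produced by split() is nonempty (loop invariant of split₀.go)
theorem pv_split₀_go_ne (s : List Char) : ∀ (cur : List Char) (acc : List (List Char)),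
    (∀ w ∈ acc, w ≠ []) → ∀ w ∈ PySem.Chars.split₀.go s cur acc, w ≠ [] := by
  induction s with
  | nil =>
    intro cur acc hacc w hw
    unfold PySem.Chars.split₀.go at hw
    split at hw
    · exact hacc w (List.mem_reverse.mp hw)
    next hc =>
      rcases List.mem_cons.mp (List.mem_reverse.mp hw) with h | h
      · subst h
        simp only [ne_eq, List.reverse_eq_nil_iff]
        simpa [List.isEmpty_iff] using hc
      · exact hacc w h
  | cons c rest ih =>
    intro cur acc hacc w hw
    unfold PySem.Chars.split₀.go at hw
    split at hw
    · split at hw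
      · exact ih [] acc hacc w hw
      next hc =>
        refine ih [] (cur.reverse :: acc) ?_ w hw
        intro v hv
        rcases List.mem_cons.mp hv with h | h
        · subst h
          simp only [ne_eq, List.reverse_eq_nil_iff]
          simpa [List.isEmpty_iff] using hc
        · exact hacc v h
    · exact ih (c :: cur) acc hacc w hw

theorem pv_split₀_ne (s : List Char) : ∀ w ∈ PySem.Chars.split₀ s, w ≠ [] := by
  unfold PySem.Chars.split₀
  exact pv_split₀_go_ne s [] [] (by simp)

-- A's accumulator loop over nonempty words appends the capitalised words to init
theorem pv_foldl_cap (rest : List (List Char)) (init : List Char)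
    (h : ∀ w ∈ rest, w ≠ []) :
    rest.foldl (fun r w =>
      if w.isEmpty then r
      else r ++ (match w with
        | [] => []
        | c :: cs => PySem.Chars.upperChar c :: cs)) init
      = init ++ pvCapAll rest := by
  induction rest generalizing init with
  | nil => simp [pvCapAll]
  | cons w ws ih =>
    have hw : w ≠ [] := h w (by simp)
    simp only [List.foldl_cons]
    rw [if_neg (by simpa [List.isEmpty_iff] using hw)]
    rw [ih _ (fun v hv => h v (by simp [hv]))]
    cases w with
    | nil => exact absurd rfl hw
    | cons c cs => simp [pvCap, pvCapAll]

-- go accumulates: the acc argument is a prefix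
theorem pv_go_acc (t : List Char) : ∀ (cur : List Char) (acc : List (List Char)),
    PySem.Chars.split₀.go t cur acc = acc.reverse ++ PySem.Chars.split₀.go t cur [] := by
  induction t with
  | nil =>
    intro cur acc
    unfold PySem.Chars.split₀.go
    by_cases h : cur.isEmpty = true <;> simp [h]
  | cons c t ih =>
    intro cur acc
    unfold PySem.Chars.split₀.go
    split_ifs with hs hc
    · exact ih [] acc
    · rw [ih [] (cur.reverse :: acc), ih [] [cur.reverse]]
      simp
    · exact ih (c :: cur) acc

-- go in the middle of a word: consumes the rest of the word
theorem pv_go_mid (t : List Char) : ∀ (cur : List Char) (acc : List (List Char)), cur ≠ [] →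
    PySem.Chars.split₀.go t cur acc
      = PySem.Chars.split₀.go (t.dropWhile pvP) [] ((cur.reverse ++ t.takeWhile pvP) :: acc) := by
  induction t with
  | nil =>
    intro cur acc hcur
    unfold PySem.Chars.split₀.go
    simp [List.isEmpty_iff, hcur]
  | cons c t ih =>
    intro cur acc hcur
    by_cases hs : PySem.Chars.isspace c = true
    · have hP : pvP c = false := by simp [pvP, hs]
      rw [List.dropWhile_cons_of_neg (by simp [hP]), List.takeWhile_cons_of_neg (by simp [hP])]
      conv_lhs => unfold PySem.Chars.split₀.go
      conv_rhs => unfold PySem.Chars.split₀.go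
      simp [hs, List.isEmpty_iff, hcur]
    · have hP : pvP c = true := by simp [pvP, hs]
      rw [List.dropWhile_cons_of_pos (by simp [hP]), List.takeWhile_cons_of_pos (by simp [hP])]
      conv_lhs => unfold PySem.Chars.split₀.go
      simp only [hs, Bool.false_eq_true, if_false]
      rw [ih (c :: cur) acc (by simp)]
      simp

theorem pv_split₀_nil : PySem.Chars.split₀ [] = [] := rfl

theorem pv_split₀_space (c : Char) (t : List Char) (hs : PySem.Chars.isspace c = true) :
    PySem.Chars.split₀ (c :: t) = PySem.Chars.split₀ t := by
  unfold PySem.Chars.split₀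
  conv_lhs => unfold PySem.Chars.split₀.go
  simp [hs]

theorem pv_split₀_word (c : Char) (t : List Char) (hs : PySem.Chars.isspace c = false) :
    PySem.Chars.split₀ (c :: t)
      = (c :: t.takeWhile pvP) :: PySem.Chars.split₀ (t.dropWhile pvP) := by
  unfold PySem.Chars.split₀
  conv_lhs => unfold PySem.Chars.split₀.go
  simp only [hs, Bool.false_eq_true, if_false]
  rw [pv_go_mid t [c] [] (by simp), pv_go_acc]
  simp

-- the scan in the middle of a word copies the rest of the word verbatim
theorem pv_scan_mid (t : List Char) : ∀ (out : List Char),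
    t.foldl pvStep (out, false)
      = (t.dropWhile pvP).foldl pvStep (out ++ t.takeWhile pvP, false) := by
  induction t with
  | nil => intro out; simp
  | cons c t ih =>
    intro out
    by_cases hs : PySem.Chars.isspace c = true
    · have hP : pvP c = false := by simp [pvP, hs]
      rw [List.dropWhile_cons_of_neg (by simp [hP]), List.takeWhile_cons_of_neg (by simp [hP])]
      simp
    · have hP : pvP c = true := by simp [pvP, hs]
      rw [List.dropWhile_cons_of_pos (by simp [hP]), List.takeWhile_cons_of_pos (by simp [hP])]
      have hstep : pvStep (out, false) c = (out ++ [c], false) := by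
        simp [pvStep, hs]
      rw [List.foldl_cons, hstep, ih]
      simp

theorem pv_dropWhile_head (p : Char → Bool) (l : List Char) (x : Char) (xs : List Char)
    (h : l.dropWhile p = x :: xs) : p x = false := by
  induction l with
  | nil => simp at h
  | cons c t ih =>
    by_cases hc : p c = true
    · rw [List.dropWhile_cons_of_pos hc] at h; exact ih h
    · rw [List.dropWhile_cons_of_neg (by simp_all)] at h
      cases h; simpa using hc

-- main invariant: the scan from a boundary state computes the camelized word list
theorem pv_main (n : Nat) : ∀ (s : List Char) (out : List Char), s.length ≤ n →
    (s.foldl pvStep (out, true)).1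
      = out ++ (if out.isEmpty then pvCamel (PySem.Chars.split₀ s)
                else pvCapAll (PySem.Chars.split₀ s)) := by
  induction n with
  | zero =>
    intro s out hlen
    have : s = [] := List.eq_nil_of_length_eq_zero (Nat.le_zero.mp hlen)
    subst this
    by_cases h : out.isEmpty = true <;> simp [h, pv_split₀_nil, pvCamel, pvCapAll]
  | succ m ih =>
    intro s out hlen
    cases s with
    | nil =>
      by_cases h : out.isEmpty = true <;> simp [h, pv_split₀_nil, pvCamel, pvCapAll]
    | cons c t =>
      have htlen : t.length ≤ m := by simpa using hlen
      by_cases hs : PySem.Chars.isspace c = true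
      · have hstep : pvStep (out, true) c = (out, true) := by simp [pvStep, hs]
        rw [List.foldl_cons, hstep, ih t out htlen, pv_split₀_space c t hs]
      · have hs' : PySem.Chars.isspace c = false := by simpa using hs
        have hstep : pvStep (out, true) c
            = (out ++ [if out.isEmpty then PySem.Chars.lowerChar c else PySem.Chars.upperChar c],
               false) := by simp [pvStep, hs]
        set g := if out.isEmpty then PySem.Chars.lowerChar c else PySem.Chars.upperChar c with hg
        set w := t.takeWhile pvP with hwdef
        set r := t.dropWhile pvP with hrdef
        have hsplit := pv_split₀_word c t hs'
        rw [List.foldl_cons, hstep, pv_scan_mid t (out ++ [g])]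
        rw [← hwdef, ← hrdef] at hsplit ⊢
        have hone : ∀ rest, out ++ (if out.isEmpty then pvCamel ((c :: w) :: rest)
              else pvCapAll ((c :: w) :: rest))
            = out ++ [g] ++ w ++ pvCapAll rest := by
          intro rest
          by_cases ho : out.isEmpty = true <;>
            simp [ho, hg, pvCamel, pvCapAll, pvCap]
        cases hr : r with
        | nil =>
          rw [hsplit, hr, pv_split₀_nil, hone]
          simp [pvCapAll]
        | cons d r' =>
          have hd : PySem.Chars.isspace d = true := by
            have := pv_dropWhile_head pvP t d r' (hrdef ▸ hr)
            simpa [pvP] using this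
          have hstepd : pvStep (out ++ [g] ++ w, false) d = (out ++ [g] ++ w, true) := by
            simp [pvStep, hd]
          have hr'len : r'.length ≤ m := by
            have h1 : r.length ≤ t.length := hrdef ▸ t.length_dropWhile_le pvP
            rw [hr] at h1; simp at h1; omega
          rw [List.foldl_cons, hstepd, ih r' (out ++ [g] ++ w) hr'len]
          have hne : (out ++ [g] ++ w).isEmpty = false := by simp
          rw [hne, hsplit, hr, pv_split₀_space d r' hd, hone]
          simp
        
-- ===== VERDICT (by name: the statement is the Claim_ definition above) =====
theorem tag_to_service_filename_spec : Claim_equal_tag_to_service_filename := by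
  intro tag _
  unfold Spec_tag_to_service_filename
  rw [pv_alt_eq, pv_main tag.toList.length tag.toList [] (le_refl _)]
  unfold tag_to_service_filename
  cases hw : PySem.Chars.split₀ tag.toList with
  | nil => simp [pvCamel]
  | cons w0 rest =>
    have hne : ∀ w ∈ w0 :: rest, w ≠ [] := hw ▸ pv_split₀_ne tag.toList
    obtain ⟨c, cs, rfl⟩ : ∃ c cs, w0 = c :: cs := by
      cases w0 with
      | nil => exact absurd rfl (hne [] (by simp))
      | cons c cs => exact ⟨c, cs, rfl⟩
    dsimp only
    rw [pv_foldl_cap rest _ (fun v hv => hne v (by simp [hv]))]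
    simp [pvCamel]
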